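-- pv_equiv track=rewrite | github.com/RioPhillips/7T_BIDS_Organiser | bids7t/core/bids_naming.py | build_bids_name
-- ===== SOURCE A (Python) =====
-- from typing import Dict, List, Optional, Set
--
-- BIDS_ENTITY_ORDER: List[str] = [
--     'task', 'acq', 'ce', 'trc', 'stain', 'rec', 'dir', 'run',
--     'mod', 'echo', 'flip', 'inv', 'mt', 'part', 'proc', 'hemi',
--     'space', 'split', 'recording', 'chunk', 'atlas', 'res', 'den',
--     'label', 'desc',
-- ]
--
-- def build_bids_name(prefix: str, entities: Dict[str, str], suffix: str,
--                     extension: str = '.nii.gz') -> str: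
--     """
--     Build a BIDS filename from components using canonical entity order.
--
--     Parameters
--     ----------
--     prefix : str
--         Subject/session prefix, e.g. 'sub-S01' or 'sub-S01_ses-MR1'
--     entities : dict
--         Entity key-value pairs. Keys in BIDS_ENTITY_ORDER are placed
--         in canonical order; others are appended alphabetically.
--     suffix : str
--         BIDS suffix, e.g. 'MP2RAGE', 'TB1map', 'bold'
--     extension : str
--         File extension including dot (default '.nii.gz')
--
--     Returns
--     -------
--     str
--         Fully constructed BIDS filename.
--
--     Examples
--     --------
--     >>> build_bids_name('sub-S01', {'run': '1', 'inv': '1', 'desc': 'EP'}, 'MP2RAGE')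
--     'sub-S01_run-1_inv-1_desc-EP_MP2RAGE.nii.gz'
--     """
--     parts = [prefix] if prefix else []
--
--     # entities in canonical order first
--     added = set()
--     for entity_key in BIDS_ENTITY_ORDER:
--         if entity_key in entities:
--             parts.append(f"{entity_key}-{entities[entity_key]}")
--             added.add(entity_key)
--
--     # then any non-standard entities alphabetically
--     for key in sorted(entities.keys()):
--         if key not in added:
--             parts.append(f"{key}-{entities[key]}")
--
--     parts.append(suffix)
--     return '_'.join(parts) + extension
-- ===== SOURCE B (Python) =====
-- from typing import Dict, List
--
-- BIDS_ENTITY_ORDER: List[str] = [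
--     'task', 'acq', 'ce', 'trc', 'stain', 'rec', 'dir', 'run',
--     'mod', 'echo', 'flip', 'inv', 'mt', 'part', 'proc', 'hemi',
--     'space', 'split', 'recording', 'chunk', 'atlas', 'res', 'den',
--     'label', 'desc',
-- ]
--
-- _RANK: Dict[str, int] = {name: i for i, name in enumerate(BIDS_ENTITY_ORDER)}
--
-- def build_bids_name(prefix: str, entities: Dict[str, str], suffix: str,
--                     extension: str = '.nii.gz') -> str:
--     # One pass over the entities themselves: collect canonical ranks and
--     # non-standard keys, then sort each side instead of scanning the table.
--     ranks: List[int] = []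
--     extra: List[str] = []
--     for k in entities:
--         if k in _RANK:
--             ranks.append(_RANK[k])
--         else:
--             extra.append(k)
--     keys = [BIDS_ENTITY_ORDER[i] for i in sorted(ranks)] + sorted(extra)
--     parts = ([prefix] if prefix else []) \
--         + [f"{k}-{entities[k]}" for k in keys] + [suffix]
--     return '_'.join(parts) + extension
-- ===== Notes on version B (the rewrite author's own statement) =====
-- stated objective: alternative
-- what changed: Instead of scanning the 25-entry canonical table against the dict and keeping a 'added' set for a second pass over sorted keys, B makes one pass over the entities splitting keys into canonical ranks and extras, then sorts the ranks and the extras and maps ranks back through the table.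
import Mathlib
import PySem

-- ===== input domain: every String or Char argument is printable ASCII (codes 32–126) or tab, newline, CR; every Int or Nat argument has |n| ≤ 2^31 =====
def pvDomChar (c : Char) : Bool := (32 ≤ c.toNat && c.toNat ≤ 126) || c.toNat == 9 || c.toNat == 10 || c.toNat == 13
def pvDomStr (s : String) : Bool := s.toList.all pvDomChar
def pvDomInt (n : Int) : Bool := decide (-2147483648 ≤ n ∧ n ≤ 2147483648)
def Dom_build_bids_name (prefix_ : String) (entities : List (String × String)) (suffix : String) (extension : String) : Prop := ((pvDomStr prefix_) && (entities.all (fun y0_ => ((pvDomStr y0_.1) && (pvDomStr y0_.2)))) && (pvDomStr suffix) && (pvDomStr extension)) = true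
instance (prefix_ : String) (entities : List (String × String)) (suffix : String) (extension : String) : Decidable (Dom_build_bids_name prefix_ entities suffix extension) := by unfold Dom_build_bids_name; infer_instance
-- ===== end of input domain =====

-- B replaces A's table-scan + added-set + second pass by one pass over the entities
-- splitting keys into canonical ranks and extras, sorting each side (alternative decomposition).


def pvOrder : List String :=
  ["task", "acq", "ce", "trc", "stain", "rec", "dir", "run",
   "mod", "echo", "flip", "inv", "mt", "part", "proc", "hemi",
   "space", "split", "recording", "chunk", "atlas", "res", "den",
   "label", "desc"]

-- ===== PORT A =====
def build_bids_name (prefix_ : String) (entities : List (String × String)) (suffix : String) (extension : String) : String :=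
  let d : PySem.Dict String String := PySem.Dict.ofList entities
  let parts0 : List String := if prefix_ ≠ "" then [prefix_] else []
  -- entities in canonical order first, recording added keys
  let st := pvOrder.foldl
    (fun (st : List String × PySem.Set String) ek =>
      if d.contains ek then (st.1 ++ [ek ++ "-" ++ d.getD ek ""], PySem.Set.add st.2 ek) else st)
    (parts0, PySem.Set.empty)
  -- then any non-standard entities alphabetically
  let parts1 := (PySem.List.sorted d.keys (fun k => k)).foldl
    (fun p k => if !(PySem.Set.contains st.2 k) then p ++ [k ++ "-" ++ d.getD k ""] else p)
    st.1
  PySem.Str.join "_" (parts1 ++ [suffix]) ++ extension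

-- ===== PORT B =====
-- rank table {name: i for i, name in enumerate(BIDS_ENTITY_ORDER)}, built once at module level
def pvRank : PySem.Dict String Int :=
  PySem.Dict.ofList ((PySem.List.enumerate pvOrder 0).map (fun p => (p.2, p.1)))

def build_bids_name_alt (prefix_ : String) (entities : List (String × String)) (suffix : String) (extension : String) : String :=
  let d : PySem.Dict String String := PySem.Dict.ofList entities
  let st := d.keys.foldl
    (fun (st : List Int × List String) k =>
      if pvRank.contains k then (st.1 ++ [pvRank.getD k 0], st.2) else (st.1, st.2 ++ [k]))
    ([], [])
  let keys := (PySem.List.sorted st.1 (fun i => i)).map (fun i => PySem.List.pyGetD pvOrder i "")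
      ++ PySem.List.sorted st.2 (fun k => k)
  let parts := (if prefix_ ≠ "" then [prefix_] else [])
      ++ keys.map (fun k => k ++ "-" ++ d.getD k "") ++ [suffix]
  PySem.Str.join "_" parts ++ extension

-- ===== PRECONDITION & SPEC =====
def Spec_build_bids_name (prefix_ : String) (entities : List (String × String)) (suffix : String) (extension : String) (out : String) : Prop := out = build_bids_name_alt prefix_ entities suffix extension
instance (prefix_ : String) (entities : List (String × String)) (suffix : String) (extension : String) (out : String) : Decidable (Spec_build_bids_name prefix_ entities suffix extension out) := by unfold Spec_build_bids_name; infer_instance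

-- ===== CLAIM (what is proved, stated in full; the proofs are below) =====
def Claim_equal_build_bids_name : Prop := ∀ (prefix_ : String) (entities : List (String × String)) (suffix : String) (extension : String), Dom_build_bids_name prefix_ entities suffix extension → Spec_build_bids_name prefix_ entities suffix extension (build_bids_name prefix_ entities suffix extension)

-- ===== LEMMAS AND PROOFS =====

theorem pv_order_nodup : pvOrder.Nodup := by decide

theorem pv_rank_keys : pvRank.keys = pvOrder := by decide

theorem pv_rank_pairwise : pvOrder.Pairwise (fun a b => pvRank.getD a 0 < pvRank.getD b 0) := by
  decide

theorem pv_back : ∀ k ∈ pvOrder, PySem.List.pyGetD pvOrder (pvRank.getD k 0) "" = k := by decide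

-- A's 'added' set: guarded Set.add over a list is set() of the filtered list
theorem pv_foldl_add_if {α : Type} [BEq α] (p : α → Bool) (l : List α) (s : PySem.Set α) :
    l.foldl (fun s k => if p k then PySem.Set.add s k else s) s
      = (l.filter p).foldl PySem.Set.add s := by
  induction l generalizing s with
  | nil => rfl
  | cons x t ih => by_cases h : p x = true <;> simp [h, ih]

theorem pv_foldl_add_if' {α : Type} [BEq α] (p : α → Bool) (l : List α) :
    l.foldl (fun s k => if p k then PySem.Set.add s k else s) PySem.Set.empty
      = PySem.Set.ofList (l.filter p) := by
  rw [PySem.Set.ofList_eq_foldl, ← pv_foldl_add_if]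
  rfl

-- A's value, written as three explicit segments
theorem pv_A (prefix_ : String) (entities : List (String × String)) (suffix extension : String) :
    build_bids_name prefix_ entities suffix extension
      = PySem.Str.join "_"
          ((if prefix_ ≠ "" then [prefix_] else [])
            ++ (pvOrder.filter (fun k => (PySem.Dict.ofList entities).contains k)).map
                 (fun k => k ++ "-" ++ (PySem.Dict.ofList entities).getD k "")
            ++ ((PySem.List.sorted (PySem.Dict.ofList entities).keys (fun k => k)).filter
                 (fun k => !(PySem.Set.contains
                     (PySem.Set.ofList (pvOrder.filter (fun k => (PySem.Dict.ofList entities).contains k))) k))).map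
                 (fun k => k ++ "-" ++ (PySem.Dict.ofList entities).getD k "")
            ++ [suffix]) ++ extension := by
  simp only [build_bids_name]
  rw [show (fun (st : List String × PySem.Set String) ek =>
        if (PySem.Dict.ofList entities).contains ek then
          (st.1 ++ [ek ++ "-" ++ (PySem.Dict.ofList entities).getD ek ""], PySem.Set.add st.2 ek)
        else st)
      = (fun (st : List String × PySem.Set String) ek =>
          ((fun p k => if (PySem.Dict.ofList entities).contains k then
              p ++ [k ++ "-" ++ (PySem.Dict.ofList entities).getD k ""] else p) st.1 ek,
           (fun s k => if (PySem.Dict.ofList entities).contains k then PySem.Set.add s k else s) st.2 ek))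
      from funext fun st => funext fun ek => by
        by_cases h : (PySem.Dict.ofList entities).contains ek = true <;> simp [h]]
  rw [PySem.List.foldl_prod_mk
    (f := fun p k => if (PySem.Dict.ofList entities).contains k then
        p ++ [k ++ "-" ++ (PySem.Dict.ofList entities).getD k ""] else p)
    (g := fun s k => if (PySem.Dict.ofList entities).contains k then PySem.Set.add s k else s)]
  rw [PySem.List.foldl_append_if, pv_foldl_add_if']
  rw [PySem.List.foldl_append_if]

-- B's value, written as explicit segments
theorem pv_B (prefix_ : String) (entities : List (String × String)) (suffix extension : String) :
    build_bids_name_alt prefix_ entities suffix extension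
      = PySem.Str.join "_"
          ((if prefix_ ≠ "" then [prefix_] else [])
            ++ ((PySem.List.sorted
                   (((PySem.Dict.ofList entities).keys.filter (fun k => pvRank.contains k)).map
                     (fun k => pvRank.getD k 0)) (fun i => i)).map
                     (fun i => PySem.List.pyGetD pvOrder i "")
                 ++ PySem.List.sorted
                     ((PySem.Dict.ofList entities).keys.filter (fun k => !pvRank.contains k)) (fun k => k)).map
                 (fun k => k ++ "-" ++ (PySem.Dict.ofList entities).getD k "")
            ++ [suffix]) ++ extension := by
  simp only [build_bids_name_alt]
  rw [show (fun (st : List Int × List String) k =>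
        if pvRank.contains k then (st.1 ++ [pvRank.getD k 0], st.2) else (st.1, st.2 ++ [k]))
      = (fun (st : List Int × List String) k =>
          ((fun a k => if pvRank.contains k then a ++ [pvRank.getD k 0] else a) st.1 k,
           (fun e k => if !pvRank.contains k then e ++ [k] else e) st.2 k))
      from funext fun st => funext fun k => by
        by_cases h : pvRank.contains k = true <;> simp [h]]
  rw [PySem.List.foldl_prod_mk
    (f := fun a k => if pvRank.contains k then a ++ [pvRank.getD k 0] else a)
    (g := fun e k => if !pvRank.contains k then e ++ [k] else e)]
  rw [PySem.List.foldl_append_if, PySem.List.foldl_append_if (f := fun k => k)]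
  simp

-- the canonical segment: B's rank-sort-and-map-back equals A's table scan
theorem pv_canon (d : PySem.Dict String String) (h : d.keys.Nodup) :
    (PySem.List.sorted ((d.keys.filter (fun k => pvRank.contains k)).map
        (fun k => pvRank.getD k 0)) (fun i => i)).map (fun i => PySem.List.pyGetD pvOrder i "")
      = pvOrder.filter (fun k => d.contains k) := by
  have hperm : (pvOrder.filter (fun k => d.contains k)).Perm
      (d.keys.filter (fun k => pvRank.contains k)) := by
    rw [List.perm_ext_iff_of_nodup (pv_order_nodup.filter _) (h.filter _)]
    intro a
    simp only [List.mem_filter, PySem.Dict.contains_eq_decide_mem_keys, pv_rank_keys,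
      decide_eq_true_eq]
    tauto
  have hpw : ((pvOrder.filter (fun k => d.contains k)).map
      (fun k => pvRank.getD k 0)).Pairwise (fun a b => a < b) := by
    rw [List.pairwise_map]
    exact pv_rank_pairwise.filter _
  rw [PySem.List.sorted_eq_of_perm_of_pairwise_lt _ _ _ (hperm.map _) hpw]
  rw [List.map_map]
  have hb : ∀ k ∈ pvOrder.filter (fun k => d.contains k),
      ((fun i => PySem.List.pyGetD pvOrder i "") ∘ (fun k => pvRank.getD k 0)) k = id k :=
    fun k hk => pv_back k (List.mem_of_mem_filter hk)
  rw [List.map_congr_left hb, List.map_id]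

-- the non-standard segment: B's sort-after-filter equals A's filter-after-sort
theorem pv_extra (d : PySem.Dict String String) (h : d.keys.Nodup) :
    PySem.List.sorted (d.keys.filter (fun k => !pvRank.contains k)) (fun k => k)
      = (PySem.List.sorted d.keys (fun k => k)).filter
          (fun k => !(PySem.Set.contains
              (PySem.Set.ofList (pvOrder.filter (fun k => d.contains k))) k)) := by
  have hq : d.keys.filter (fun k => !(PySem.Set.contains
        (PySem.Set.ofList (pvOrder.filter (fun k => d.contains k))) k))
      = d.keys.filter (fun k => !pvRank.contains k) := by
    apply List.filter_congr
    intro k hk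
    simp [PySem.Set.mem_ofList, List.mem_filter,
      PySem.Dict.contains_eq_decide_mem_keys, pv_rank_keys]
    tauto
  have hperm := (PySem.List.sorted_perm d.keys (fun k => k) false).filter
      (fun k => !(PySem.Set.contains
          (PySem.Set.ofList (pvOrder.filter (fun k => d.contains k))) k))
  rw [hq] at hperm
  have hnd : (PySem.List.sorted d.keys (fun k => k)).Nodup :=
    ((PySem.List.sorted_perm d.keys (fun k => k) false).nodup_iff).mpr h
  have hle := PySem.List.sorted_pairwise d.keys (fun k => k)
  have hlt : (PySem.List.sorted d.keys (fun k => k)).Pairwise (fun a b => a < b) :=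
    (hle.and hnd).imp (fun hh => lt_of_le_of_ne hh.1 hh.2)
  exact PySem.List.sorted_eq_of_perm_of_pairwise_lt _ _ _ hperm (hlt.filter _)

theorem pv_main (prefix_ : String) (entities : List (String × String)) (suffix extension : String) :
    build_bids_name prefix_ entities suffix extension
      = build_bids_name_alt prefix_ entities suffix extension := by
  have h : (PySem.Dict.ofList entities).keys.Nodup := PySem.Dict.nodup_keys_ofList entities
  rw [pv_A, pv_B]
  rw [List.map_append, pv_canon _ h, pv_extra _ h]
  simp [List.append_assoc]

-- ===== VERDICT (by name: the statement is the Claim_ definition above) =====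
theorem build_bids_name_spec : Claim_equal_build_bids_name := by
  intro p e s x _
  unfold Spec_build_bids_name
  exact pv_main p e s x
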